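-- pv_equiv track=rewrite | github.com/salomon3-coder/howcanihack | scripts/generate_article.py | build_title_block_for_prompt
-- ===== SOURCE A (Python) =====
-- PROMPT_TITLES_MAX_CHARS = 12000
--
-- def build_title_block_for_prompt(existing_titles, max_chars=PROMPT_TITLES_MAX_CHARS):
--     lines = []
--     total = 0
--     for i, t in enumerate(existing_titles, start=1):
--         line = f"{i}. {t}"
--         if total + len(line) + 1 > max_chars:
--             lines.append(f"... ({len(existing_titles) - i + 1} more titles omitted)")
--             break
--         lines.append(line)
--         total += len(line) + 1
--     return "\n".join(lines) if lines else "(none yet)"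
-- ===== SOURCE B (Python) =====
-- PROMPT_TITLES_MAX_CHARS = 12000
--
-- def build_title_block_for_prompt(existing_titles, max_chars=PROMPT_TITLES_MAX_CHARS):
--     if not existing_titles:
--         return "(none yet)"
--     lines = [f"{i}. {t}" for i, t in enumerate(existing_titles, 1)]
--     cum = []
--     c = 0
--     for l in lines:
--         c += len(l) + 1
--         cum.append(c)
--     k = next((j for j, v in enumerate(cum) if v > max_chars), len(lines))
--     if k == len(lines):
--         return "\n".join(lines)
--     return "\n".join(lines[:k] + [f"... ({len(lines) - k} more titles omitted)"])
-- ===== Notes on version B (the rewrite author's own statement) =====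
-- stated objective: alternative
-- what changed: Instead of one loop that formats, accumulates the budget and breaks in-place, B formats all lines first, computes the cumulative per-line costs, finds the first index exceeding max_chars and slices the accepted prefix, appending the omitted-count line when a cutoff exists.
import Mathlib
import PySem

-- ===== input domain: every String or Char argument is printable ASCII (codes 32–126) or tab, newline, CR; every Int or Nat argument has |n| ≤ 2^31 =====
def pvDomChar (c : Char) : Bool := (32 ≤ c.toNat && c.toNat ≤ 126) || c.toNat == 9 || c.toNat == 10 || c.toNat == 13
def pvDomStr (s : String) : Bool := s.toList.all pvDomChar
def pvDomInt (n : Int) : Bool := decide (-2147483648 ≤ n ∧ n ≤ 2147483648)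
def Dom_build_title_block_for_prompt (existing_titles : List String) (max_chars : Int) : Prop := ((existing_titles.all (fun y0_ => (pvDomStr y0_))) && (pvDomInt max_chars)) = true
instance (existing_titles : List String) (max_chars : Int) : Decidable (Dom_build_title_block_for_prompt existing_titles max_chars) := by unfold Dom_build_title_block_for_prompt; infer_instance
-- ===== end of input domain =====

-- B formats all lines first, takes cumulative costs, cuts at the first index over budget; A loops with a running total and breaks.

-- ===== PORT A =====
-- the for-loop with break: state (total, lines), index i, n = len(existing_titles)
def pvGoA (n mc : Int) : List String → Int → Int → List String → List String
  | [], _, _, lines => lines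
  | t :: rest, i, total, lines =>
    let line := PySem.Int.toStr i ++ ". " ++ t
    if total + PySem.Str.len line + 1 > mc then
      lines ++ ["... (" ++ PySem.Int.toStr (n - i + 1) ++ " more titles omitted)"]
    else
      pvGoA n mc rest (i + 1) (total + PySem.Str.len line + 1) (lines ++ [line])

def build_title_block_for_prompt (existing_titles : List String) (max_chars : Int) : String :=
  let lines := pvGoA (existing_titles.length : Int) max_chars existing_titles 1 0 []
  if lines = [] then "(none yet)" else PySem.Str.join "\n" lines

-- ===== PORT B =====
def pvFmt (p : Int × String) : String := PySem.Int.toStr p.1 ++ ". " ++ p.2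

-- running prefix sums of the per-line costs (the cum list built in Source B)
def pvAccFrom (t : Int) : List Int → List Int
  | [] => []
  | c :: cs => (t + c) :: pvAccFrom (t + c) cs

def build_title_block_for_prompt_alt (existing_titles : List String) (max_chars : Int) : String :=
  if existing_titles = [] then "(none yet)" else
  let lines := (PySem.List.enumerate existing_titles 1).map pvFmt
  let cum := pvAccFrom 0 (lines.map (fun l => PySem.Str.len l + 1))
  let k := cum.findIdx (fun v => decide (v > max_chars))
  if k = lines.length then PySem.Str.join "\n" lines
  else PySem.Str.join "\n"
    (lines.take k ++ ["... (" ++ PySem.Int.toStr ((lines.length : Int) - (k : Int)) ++ " more titles omitted)"])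

-- ===== PRECONDITION & SPEC =====
def Spec_build_title_block_for_prompt (existing_titles : List String) (max_chars : Int) (out : String) : Prop := out = build_title_block_for_prompt_alt existing_titles max_chars
instance (existing_titles : List String) (max_chars : Int) (out : String) : Decidable (Spec_build_title_block_for_prompt existing_titles max_chars out) := by unfold Spec_build_title_block_for_prompt; infer_instance

-- ===== CLAIM (what is proved, stated in full; the proofs are below) =====
def Claim_equal_build_title_block_for_prompt : Prop := ∀ (existing_titles : List String) (max_chars : Int), Dom_build_title_block_for_prompt existing_titles max_chars → Spec_build_title_block_for_prompt existing_titles max_chars (build_title_block_for_prompt existing_titles max_chars)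

-- ===== LEMMAS AND PROOFS =====

-- proof-side spec on the already-formatted lines
def pvSpecL (mc : Int) : Int → List String → List String
  | _, [] => []
  | total, l :: rest =>
    if total + PySem.Str.len l + 1 > mc then
      ["... (" ++ PySem.Int.toStr ((l :: rest).length : Int) ++ " more titles omitted)"]
    else l :: pvSpecL mc (total + PySem.Str.len l + 1) rest

theorem pvGoA_eq_specL (n mc : Int) :
    ∀ (rest : List String) (i total : Int) (acc : List String),
      i = n - (rest.length : Int) + 1 →
      pvGoA n mc rest i total acc = acc ++ pvSpecL mc total ((PySem.List.enumerate rest i).map pvFmt) := by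
  intro rest
  induction rest with
  | nil => intro i total acc _; simp [pvGoA, PySem.List.enumerate_nil, pvSpecL]
  | cons t rest ih =>
    intro i total acc hi
    rw [PySem.List.enumerate_cons]
    simp only [pvGoA, List.map_cons, pvSpecL, pvFmt]
    split_ifs with h
    · have : n - i + 1 = ((t :: rest).length : Int) := by
        simp at hi ⊢; omega
      rw [this]
      simp
    · rw [ih (i + 1) _ (acc ++ [PySem.Int.toStr i ++ ". " ++ t]) (by simp at hi ⊢; omega)]
      simp

theorem pvSpecL_closed (mc : Int) :
    ∀ (ls : List String) (total : Int),
      pvSpecL mc total ls =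
        (let cum := pvAccFrom total (ls.map (fun l => PySem.Str.len l + 1));
         let k := cum.findIdx (fun v => decide (v > mc));
         if k = ls.length then ls
         else ls.take k ++ ["... (" ++ PySem.Int.toStr ((ls.length : Int) - (k : Int)) ++ " more titles omitted)"]) := by
  intro ls
  induction ls with
  | nil => intro total; simp [pvSpecL, pvAccFrom]
  | cons l rest ih =>
    intro total
    have hassoc : total + (PySem.Str.len l + 1) = total + PySem.Str.len l + 1 := by ring
    simp only [pvSpecL, List.map_cons, pvAccFrom, List.findIdx_cons, hassoc]
    by_cases h : total + PySem.Str.len l + 1 > mc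
    · rw [if_pos h]
      have ht : (decide (total + PySem.Str.len l + 1 > mc)) = true := by simpa using h
      rw [ht]
      simp only [cond_true]
      rw [if_neg (by simp)]
      simp
    · rw [if_neg h]
      have hb : (decide (total + PySem.Str.len l + 1 > mc)) = false := by simpa using h
      rw [hb]
      simp only [cond_false]
      rw [ih (total + PySem.Str.len l + 1)]
      set k' := (pvAccFrom (total + PySem.Str.len l + 1) (rest.map (fun l => PySem.Str.len l + 1))).findIdx (fun v => decide (v > mc)) with hkdef
      by_cases hk : k' = rest.length
      · rw [if_pos hk, if_pos (by simp [hk])]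
      · rw [if_neg hk, if_neg (by simp only [List.length_cons]; omega)]
        rw [List.take_succ_cons, List.cons_append]
        have harg : ((rest.length : Int) - (k' : Int)) = (((l :: rest).length : Int) - ((k' + 1 : Nat) : Int)) := by
          simp only [List.length_cons]
          push_cast
          ring
        rw [harg]

theorem pvSpecL_ne_nil (mc total : Int) (l : String) (rest : List String) :
    pvSpecL mc total (l :: rest) ≠ [] := by
  simp only [pvSpecL]
  split_ifs <;> simp

theorem build_title_block_for_prompt_eq (existing_titles : List String) (max_chars : Int) :
    build_title_block_for_prompt existing_titles max_chars = build_title_block_for_prompt_alt existing_titles max_chars := by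
  unfold build_title_block_for_prompt build_title_block_for_prompt_alt
  rw [pvGoA_eq_specL _ _ existing_titles 1 0 [] (by simp), List.nil_append]
  cases existing_titles with
  | nil => simp [PySem.List.enumerate_nil, pvSpecL]
  | cons t ts =>
    rw [if_neg (List.cons_ne_nil t ts)]
    have hne : pvSpecL max_chars 0 ((PySem.List.enumerate (t :: ts) 1).map pvFmt) ≠ [] := by
      rw [PySem.List.enumerate_cons, List.map_cons]
      exact pvSpecL_ne_nil _ _ _ _
    rw [if_neg hne, pvSpecL_closed]
    simp only [apply_ite (PySem.Str.join "\n")]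

-- ===== VERDICT (by name: the statement is the Claim_ definition above) =====
theorem build_title_block_for_prompt_spec : Claim_equal_build_title_block_for_prompt := by
  intro ts mc _
  exact build_title_block_for_prompt_eq ts mc
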